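-- pv_equiv track=rewrite | github.com/Demon-2-Angel/DSA_GFG | Basic/Pairwise Consecutive Elements/pairwise-consecutive-elements.py | pairWiseConsecutive
-- ===== SOURCE A (Python) =====
-- def pairWiseConsecutive(l):
--     #add code here
--     #first lets check if the stack is even or odd numbered:
--     if len(l) % 2 == 0:
--         #even
--         #Now there will be two cases: the case where len is 2 and case where len != 2:
--         #case1: len == 2:
--         if len(l) == 2:
--             if abs(l[1] - l[0]) != 1:
--                 return False
--         else:
--             for i in range(len(l)-2):
--                 if abs(l[i+1] - l[i]) != 1:
--                     return False
--                 else: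
--                     if l[i+1] - l[i] == 1:
--                         if l[i+2] - l[i+1] != 1:
--                             return False
--                     if l[i+1] - l[i] == -1:
--                         if l[i+2] - l[i+1] != -1:
--                             return False
--     else:
--         #odd
--         #first we need to pop the last element from the stack which is head for it actually.
--         l.pop()
--         #if len == 2:
--         if len(l) == 2:
--             if abs(l[1] - l[0]) != 1:
--                 return False
--         else:
--             for i in range(len(l)-2):
--                 if abs(l[i+1] - l[i]) != 1:
--                     return False
--                 else:
--                     if l[i+1] - l[i] == 1:
--                         if l[i+2] - l[i+1] != 1:
--                             return False
--                     if l[i+1] - l[i] == -1: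
--                         if l[i+2] - l[i+1] != -1:
--                             return False
--     return True
-- ===== SOURCE B (Python) =====
-- def pairWiseConsecutive(l):
--     # Same observable behaviour as A, including the pop() mutation on odd-length input:
--     # after dropping the last element when the length is odd, the list must be empty or an
--     # arithmetic progression whose common step is +1 or -1.
--     if len(l) % 2 == 1:
--         l.pop()
--     if not l:
--         return True
--     step = l[1] - l[0]
--     if step not in (1, -1):
--         return False
--     return all(y - x == step for x, y in zip(l, l[1:]))
-- ===== Notes on version B (the rewrite author's own statement) =====
-- stated objective: simpler
-- what changed: Replaces A's duplicated even/odd branches, len==2 special case and per-pair nested abs/sign chain checks with a single pass: pop on odd length, take the first difference as the reference step, require it to be +-1, and check all consecutive differences equal it.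
import Mathlib
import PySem

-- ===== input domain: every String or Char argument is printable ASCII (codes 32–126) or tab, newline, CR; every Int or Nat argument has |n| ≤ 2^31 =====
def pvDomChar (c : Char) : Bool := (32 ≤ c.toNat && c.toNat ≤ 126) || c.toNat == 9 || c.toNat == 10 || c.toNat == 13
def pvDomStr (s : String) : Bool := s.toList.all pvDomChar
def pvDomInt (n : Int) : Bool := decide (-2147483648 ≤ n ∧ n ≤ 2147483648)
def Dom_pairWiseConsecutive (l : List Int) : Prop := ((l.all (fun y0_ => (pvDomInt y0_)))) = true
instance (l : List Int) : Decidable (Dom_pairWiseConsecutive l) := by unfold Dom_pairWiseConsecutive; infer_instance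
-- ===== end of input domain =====

-- B replaces A's duplicated even/odd branches and nested abs/sign chain with one
-- reference-step-then-uniformity scan (simpler); like A it pops the last element of an
-- odd-length input (same mutation; the equivalence proved is about the return value).

-- ===== PORT A =====
-- the for-loop over range(len(l)-2) with its early returns
def pwcLoop (l : List Int) : List Nat → Bool
  | [] => true
  | i :: rest =>
    let a := PySem.List.pyGetD l ((i : Nat) : Int) 0
    let b := PySem.List.pyGetD l (((i+1 : Nat)) : Int) 0
    let c := PySem.List.pyGetD l (((i+2 : Nat)) : Int) 0
    if (b - a).natAbs ≠ 1 then false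
    else if b - a = 1 ∧ c - b ≠ 1 then false
    else if b - a = -1 ∧ c - b ≠ -1 then false
    else pwcLoop l rest

-- the block A's Python duplicates verbatim in both parity branches
def pwcBody (l : List Int) : Bool :=
  if l.length = 2 then
    if (PySem.List.pyGetD l 1 0 - PySem.List.pyGetD l 0 0).natAbs ≠ 1 then false else true
  else
    pwcLoop l (List.range (l.length - 2))

def pairWiseConsecutive (l : List Int) : Bool :=
  if l.length % 2 = 0 then pwcBody l
  else pwcBody l.dropLast   -- l.pop(): drop the last element (value-level model of the mutation)

-- ===== PORT B =====
def pairWiseConsecutive_alt (l : List Int) : Bool :=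
  let m := if l.length % 2 = 1 then l.dropLast else l
  match m with
  | [] => true
  | [_] => true   -- unreachable: m always has even length (Source B never reaches l[1] here)
  | a :: b :: rest =>
    let step := b - a
    if step ≠ 1 ∧ step ≠ -1 then false
    else ((a :: b :: rest).zip (b :: rest)).all (fun p => p.2 - p.1 == step)

-- ===== PRECONDITION & SPEC =====
def Spec_pairWiseConsecutive (l : List Int) (out : Bool) : Prop := out = pairWiseConsecutive_alt l
instance (l : List Int) (out : Bool) : Decidable (Spec_pairWiseConsecutive l out) := by unfold Spec_pairWiseConsecutive; infer_instance

-- ===== CLAIM (what is proved, stated in full; the proofs are below) =====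
def Claim_equal_pairWiseConsecutive : Prop := ∀ (l : List Int), Dom_pairWiseConsecutive l → Spec_pairWiseConsecutive l (pairWiseConsecutive l)

-- ===== LEMMAS AND PROOFS =====

-- the i-th consecutive difference of m (total, via getD; indices used are always in range)
def dstep (m : List Int) (i : Nat) : Int := m.getD (i+1) 0 - m.getD i 0

-- what one iteration of A's loop demands at index i
def ChkP (m : List Int) (i : Nat) : Prop :=
  (dstep m i).natAbs = 1 ∧ (dstep m i = 1 → dstep m (i+1) = 1) ∧ (dstep m i = -1 → dstep m (i+1) = -1)

-- B's core as a standalone function of the (possibly popped) list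
def altCore (m : List Int) : Bool :=
  match m with
  | [] => true
  | [_] => true
  | a :: b :: rest =>
    if (b - a) ≠ 1 ∧ (b - a) ≠ -1 then false
    else ((a :: b :: rest).zip (b :: rest)).all (fun p => p.2 - p.1 == (b - a))

lemma alt_eq (l : List Int) :
    pairWiseConsecutive_alt l = altCore (if l.length % 2 = 1 then l.dropLast else l) := rfl

lemma pwcLoop_iff (m : List Int) : ∀ (r : List Nat), pwcLoop m r = true ↔ ∀ i ∈ r, ChkP m i
  | [] => by simp [pwcLoop]
  | i :: rest => by
    have ih := pwcLoop_iff m rest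
    rw [List.forall_mem_cons, ← ih]
    simp only [pwcLoop, PySem.List.pyGetD_natCast, ChkP, dstep]
    split_ifs with h1 h2 h3
    · simp only [false_iff]; rintro ⟨⟨c1, -, -⟩, -⟩; exact h1 c1
    · simp only [false_iff]; rintro ⟨⟨-, c2, -⟩, -⟩; exact h2.2 (c2 h2.1)
    · simp only [false_iff]; rintro ⟨⟨-, -, c3⟩, -⟩; exact h3.2 (c3 h3.1)
    · constructor
      · intro h; exact ⟨⟨by omega, fun h' => by tauto, fun h' => by tauto⟩, h⟩
      · rintro ⟨-, h⟩; exact h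

lemma zip_all_iff (s : Int) : ∀ (m : List Int),
    ((m.zip (m.drop 1)).all (fun p => p.2 - p.1 == s)) = true ↔ ∀ i < m.length - 1, dstep m i = s
  | [] => by simp
  | [x] => by simp
  | x :: y :: t => by
    have ih := zip_all_iff s (y :: t)
    simp only [List.drop_succ_cons, List.drop_zero, List.zip_cons_cons, List.all_cons,
      Bool.and_eq_true, beq_iff_eq, List.length_cons, Nat.add_sub_cancel] at ih ⊢
    rw [ih]
    constructor
    · rintro ⟨h0, hrest⟩ i hi
      cases i with
      | zero => simpa [dstep] using h0
      | succ n => simpa [dstep] using hrest n (by omega)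
    · intro h
      exact ⟨by simpa [dstep] using h 0 (by omega),
             fun n hn => by simpa [dstep] using h (n+1) (by omega)⟩

lemma chain_iff (f : Nat → Int) (k : Nat) (hk : 1 ≤ k) :
    (∀ i < k, (f i).natAbs = 1 ∧ (f i = 1 → f (i+1) = 1) ∧ (f i = -1 → f (i+1) = -1))
    ↔ ((f 0 = 1 ∨ f 0 = -1) ∧ ∀ i < k + 1, f i = f 0) := by
  constructor
  · intro h
    obtain ⟨a1, -, -⟩ := h 0 hk
    refine ⟨by omega, ?_⟩
    intro i
    induction i with
    | zero => intro _; rfl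
    | succ n ih =>
      intro hn
      obtain ⟨c1, c2, c3⟩ := h n (by omega)
      have hfn : f n = f 0 := ih (by omega)
      rcases (by omega : f n = 1 ∨ f n = -1) with h1 | h1
      · have := c2 h1; omega
      · have := c3 h1; omega
  · rintro ⟨h0, hall⟩ i hi
    have hi1 := hall i (by omega)
    have hi2 := hall (i+1) (by omega)
    exact ⟨by omega, fun _ => by omega, fun _ => by omega⟩

lemma core_eq : ∀ (m : List Int), pwcBody m = altCore m
  | [] => by decide
  | [x] => by simp [pwcBody, pwcLoop, altCore]
  | [x, y] => by
    simp only [pwcBody, altCore, List.length_cons, List.length_nil]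
    norm_num [PySem.List.pyGetD]
    by_cases h1 : y - x = 1 <;> by_cases h2 : y - x = -1 <;> simp [h1, h2] <;> omega
  | a :: b :: c :: rest => by
    have hne2 : (a :: b :: c :: rest).length ≠ 2 := by simp
    have hk : 1 ≤ (a :: b :: c :: rest).length - 2 := by simp only [List.length_cons]; omega
    rw [pwcBody, if_neg hne2]
    rw [Bool.eq_iff_iff, pwcLoop_iff]
    have hchain := chain_iff (dstep (a :: b :: c :: rest)) ((a :: b :: c :: rest).length - 2) hk
    have hd0 : dstep (a :: b :: c :: rest) 0 = b - a := by simp [dstep]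
    by_cases hs : (b - a) = 1 ∨ (b - a) = -1
    · have halt : altCore (a :: b :: c :: rest)
          = ((a :: b :: c :: rest).zip ((a :: b :: c :: rest).drop 1)).all
              (fun p => p.2 - p.1 == (b - a)) := by
        simp only [altCore, List.drop_succ_cons, List.drop_zero]
        rw [if_neg (by tauto)]
      rw [halt, zip_all_iff]
      simp only [List.mem_range, ChkP]
      rw [hchain]
      constructor
      · rintro ⟨-, hall⟩ i hi
        have := hall i (by simp only [List.length_cons] at hi ⊢; omega)
        omega
      · intro hall
        refine ⟨by omega, fun i hi => ?_⟩
        have h1 := hall i (by simp only [List.length_cons] at hi ⊢; omega)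
        have h2 := hall 0 (by simp only [List.length_cons]; omega)
        omega
    · have halt : altCore (a :: b :: c :: rest) = false := by
        simp only [altCore]
        rw [if_pos (by tauto)]
      rw [halt]
      simp only [Bool.false_eq_true, iff_false]
      intro hall
      have hc := hall 0 (List.mem_range.mpr (by simp only [List.length_cons]; omega))
      simp only [ChkP] at hc
      obtain ⟨c1, -, -⟩ := hc
      omega

-- ===== VERDICT (by name: the statement is the Claim_ definition above) =====
theorem pairWiseConsecutive_spec : Claim_equal_pairWiseConsecutive := by
  intro l _
  unfold Spec_pairWiseConsecutive
  rw [alt_eq, pairWiseConsecutive]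
  by_cases h : l.length % 2 = 0
  · rw [if_pos h, if_neg (by omega), core_eq]
  · rw [if_neg h, if_pos (by omega), core_eq]
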